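-- pv_equiv track=rewrite | github.com/simo11111/Mqq | mainmq.py | encrypt_id
-- ===== SOURCE A (Python) =====
-- def encrypt_id(number):
--     number = int(number)
--     encoded_bytes = []
--     while True:
--         byte = number & 0x7F
--         number >>= 7
--         if number: byte |= 0x80
--         encoded_bytes.append(byte)
--         if not number: break
--     return bytes(encoded_bytes).hex()
-- ===== SOURCE B (Python) =====
-- def encrypt_id(number):
--     number = int(number)
--     n = max(1, (number.bit_length() + 6) // 7)
--     out = bytearray()
--     for i in range(n):
--         b = (number >> (7 * i)) & 0x7F
--         if i != n - 1:
--             b |= 0x80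
--         out.append(b)
--     return bytes(out).hex()
-- ===== Notes on version B (the rewrite author's own statement) =====
-- stated objective: alternative
-- what changed: Replaces A's shift-until-zero do-while accumulation with a closed-form byte count n = max(1,(bit_length+6)//7) and a single indexed pass extracting byte i as (number>>(7*i))&0x7F with the continuation bit set for i != n-1.
import Mathlib
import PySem

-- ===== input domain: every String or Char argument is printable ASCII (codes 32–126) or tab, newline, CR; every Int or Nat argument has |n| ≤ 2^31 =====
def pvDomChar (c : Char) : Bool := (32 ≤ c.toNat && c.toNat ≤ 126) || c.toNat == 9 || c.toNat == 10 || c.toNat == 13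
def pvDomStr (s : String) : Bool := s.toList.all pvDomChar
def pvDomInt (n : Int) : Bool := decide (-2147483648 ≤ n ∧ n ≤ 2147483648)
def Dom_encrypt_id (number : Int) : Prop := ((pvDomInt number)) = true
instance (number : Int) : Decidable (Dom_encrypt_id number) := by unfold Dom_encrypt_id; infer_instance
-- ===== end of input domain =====

-- B replaces A's shift-until-zero do-while with a closed-form byte count and one indexed pass (return value only; A mutates nothing).

-- ===== PORT A =====
-- bytes(bs).hex(): two lowercase hex digits per byte (exact for byte values 0..255)
def pvHexDigit (n : Nat) : Char := Char.ofNat (if n < 10 then 48 + n else 87 + n)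
def pvBytesHex (bs : List Int) : String :=
  String.ofList (bs.flatMap (fun b => [pvHexDigit (b.toNat / 16), pvHexDigit (b.toNat % 16)]))

-- A's 'while True' loop; fuel exhaustion (first branch) is Python's divergence, reached only for number < 0, outside Pre_
def encryptLoop : Nat → Int → List Int → List Int
  | 0, _, acc => acc
  | fuel+1, number, acc =>
    let byte : Int := PySem.Int.band number 127
    let number2 : Int := number >>> (7 : Nat)
    let byte2 : Int := if number2 ≠ 0 then PySem.Int.bor byte 128 else byte
    let acc2 := acc ++ [byte2]
    if number2 ≠ 0 then encryptLoop fuel number2 acc2 else acc2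

def encrypt_id (number : Int) : String :=
  pvBytesHex (encryptLoop (number.natAbs + 1) number [])

-- ===== PORT B =====
def encrypt_id_alt (number : Int) : String :=
  let n := max 1 ((PySem.Int.bitLength number + 6) / 7)
  pvBytesHex ((List.range n).map (fun (i : Nat) =>
    let b : Int := PySem.Int.band (number >>> (7 * i)) 127
    if i ≠ n - 1 then PySem.Int.bor b 128 else b))

-- ===== PRECONDITION & SPEC =====
-- Pre_ excludes negative numbers: there A's 'number >>= 7' never reaches 0 and the while-loop diverges (A never returns).
def Pre_encrypt_id (number : Int) : Prop := 0 ≤ number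
instance (number : Int) : Decidable (Pre_encrypt_id number) := by unfold Pre_encrypt_id; infer_instance
def pvWitness_encrypt_id : Int := (300)

def Spec_encrypt_id (number : Int) (out : String) : Prop := out = encrypt_id_alt number
instance (number : Int) (out : String) : Decidable (Spec_encrypt_id number out) := by unfold Spec_encrypt_id; infer_instance

-- ===== CLAIM (what is proved, stated in full; the proofs are below) =====
def Claim_equal_encrypt_id : Prop := ∀ (number : Int), Dom_encrypt_id number → Pre_encrypt_id number → Spec_encrypt_id number (encrypt_id number)

-- ===== LEMMAS AND PROOFS =====

-- the base-128 little-endian digits with continuation bits, the common value of both ports' byte lists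
def chunks (m : Nat) : List Int :=
  if m / 128 = 0 then [((m &&& 127 : Nat) : Int)]
  else (((m &&& 127) ||| 128 : Nat) : Int) :: chunks (m / 128)
decreasing_by exact Nat.div_lt_self (by omega) (by omega)

theorem band127 (x : Nat) : PySem.Int.band ((x : Nat) : Int) 127 = ((x &&& 127 : Nat) : Int) := by
  rw [show (127 : Int) = ((127 : Nat) : Int) by norm_num, PySem.Int.band_natCast]

theorem bor128 (x : Nat) : PySem.Int.bor ((x : Nat) : Int) 128 = ((x ||| 128 : Nat) : Int) := by
  rw [show (128 : Int) = ((128 : Nat) : Int) by norm_num, PySem.Int.bor_natCast]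

theorem shiftk (m k : Nat) : ((m : Int) >>> k) = ((m / 2 ^ k : Nat) : Int) := by
  rw [← Int.natCast_shiftRight, Nat.shiftRight_eq_div_pow]

theorem shift7 (m i : Nat) : ((m : Int) >>> (7 * i)) = ((m / 128 ^ i : Nat) : Int) := by
  rw [shiftk, pow_mul]
  norm_num

theorem encryptLoop_eq (fuel : Nat) : ∀ (m : Nat) (acc : List Int), m < fuel →
    encryptLoop fuel ((m : Nat) : Int) acc = acc ++ chunks m := by
  induction fuel with
  | zero => intro m acc h; omega
  | succ f ih =>
    intro m acc h
    have hsh : ((m : Int) >>> (7 : Nat)) = ((m / 128 : Nat) : Int) := by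
      rw [shiftk]
      norm_num
    rw [encryptLoop]
    simp only [hsh, band127]
    by_cases hz : m / 128 = 0
    · rw [chunks]
      simp [hz]
    · have hne : ((m / 128 : Nat) : Int) ≠ 0 := fun hc => hz (by exact_mod_cast hc)
      rw [chunks]
      simp only [if_pos hne, bor128, if_neg hz]
      rw [ih (m / 128) _ (by
        have := Nat.div_lt_self (show 0 < m by omega) (show 1 < 128 by omega)
        omega)]
      simp

theorem bitLength_le_seven (m : Nat) (h : m < 128) : PySem.Int.bitLength (m : Int) ≤ 7 := by
  by_contra hc
  rcases Nat.eq_zero_or_pos m with h0 | h0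
  · subst h0; simp [PySem.Int.bitLength_zero] at hc
  · have hne : (m : Int) ≠ 0 := by exact_mod_cast (show m ≠ 0 by omega)
    have h2 := PySem.Int.two_pow_bitLength_le (m : Int) hne
    have h7 : 7 ≤ PySem.Int.bitLength (m : Int) - 1 := by omega
    have hp : (2 : Nat) ^ 7 ≤ 2 ^ (PySem.Int.bitLength (m : Int) - 1) :=
      Nat.pow_le_pow_right (by omega) h7
    have habs : (m : Int).natAbs = m := Int.natAbs_natCast m
    omega

theorem bitLength_div128 (m : Nat) (h : 128 ≤ m) :
    PySem.Int.bitLength (m : Int) = PySem.Int.bitLength ((m / 128 : Nat) : Int) + 7 := by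
  rw [PySem.Int.bitLength_natCast (show 0 < m by omega),
      PySem.Int.bitLength_natCast (show 0 < m / 2 by omega),
      PySem.Int.bitLength_natCast (show 0 < m / 2 / 2 by omega),
      PySem.Int.bitLength_natCast (show 0 < m / 2 / 2 / 2 by omega),
      PySem.Int.bitLength_natCast (show 0 < m / 2 / 2 / 2 / 2 by omega),
      PySem.Int.bitLength_natCast (show 0 < m / 2 / 2 / 2 / 2 / 2 by omega),
      PySem.Int.bitLength_natCast (show 0 < m / 2 / 2 / 2 / 2 / 2 / 2 by omega)]
  norm_num [Nat.div_div_eq_div_mul]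

theorem bitLength_pos (m : Nat) (h : 0 < m) : 1 ≤ PySem.Int.bitLength (m : Int) := by
  by_contra hc
  have h0 : PySem.Int.bitLength (m : Int) = 0 := by omega
  have hlt := PySem.Int.lt_two_pow_bitLength (m : Int)
  rw [h0] at hlt
  have habs : (m : Int).natAbs = m := Int.natAbs_natCast m
  simp [habs] at hlt
  omega

theorem rangeMapB (m : Nat) : ∀ (N : Nat), N = max 1 ((PySem.Int.bitLength (m : Int) + 6) / 7) →
    (List.range N).map (fun (i : Nat) =>
      if i ≠ N - 1 then PySem.Int.bor (PySem.Int.band ((m : Int) >>> (7 * i)) 127) 128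
      else PySem.Int.band ((m : Int) >>> (7 * i)) 127) = chunks m := by
  induction m using Nat.strong_induction_on with
  | _ m ih =>
    intro N hN
    by_cases hm : m < 128
    · have hbl := bitLength_le_seven m hm
      have hz : m / 128 = 0 := by omega
      have hN1 : N = 1 := by omega
      subst hN1
      rw [chunks]
      simp [hz, shift7, band127]
    · have hm' : 128 ≤ m := by omega
      have hbl := bitLength_div128 m hm'
      have hblpos : 1 ≤ PySem.Int.bitLength ((m / 128 : Nat) : Int) :=
        bitLength_pos _ (by omega)
      set N' := max 1 ((PySem.Int.bitLength ((m / 128 : Nat) : Int) + 6) / 7) with hN'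
      have hNval : N = N' + 1 := by
        rw [hN, hbl, hN']
        omega
      subst hNval
      rw [chunks, if_neg (by omega)]
      rw [List.range_succ_eq_map, List.map_cons, List.map_map]
      congr 1
      · rw [if_pos (by omega : (0 : Nat) ≠ N' + 1 - 1)]
        rw [show 7 * 0 = 0 by norm_num, shiftk]
        norm_num [band127, bor128]
      · rw [← ih (m / 128) (Nat.div_lt_self (by omega) (by omega)) N' hN']
        apply List.map_congr_left
        intro i hi
        have hiN : i < N' := List.mem_range.mp hi
        have hshift : ((m : Int) >>> (7 * (i + 1))) = (((m / 128 : Nat) : Int) >>> (7 * i)) := by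
          rw [shift7 m (i + 1), shift7 (m / 128) i, Nat.div_div_eq_div_mul, pow_succ,
            mul_comm (128 ^ i) 128]
        have hcond : (i + 1 ≠ N' + 1 - 1) ↔ (i ≠ N' - 1) := by omega
        simp only [Function.comp, Nat.succ_eq_add_one, hshift, hcond]

-- ===== VERDICT (by name: the statement is the Claim_ definition above) =====
theorem encrypt_id_spec : Claim_equal_encrypt_id := by
  unfold Claim_equal_encrypt_id
  intro number _ hpre
  unfold Spec_encrypt_id
  obtain ⟨m, rfl⟩ : ∃ m : Nat, number = (m : Int) := ⟨number.toNat, (Int.toNat_of_nonneg hpre).symm⟩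
  simp only [encrypt_id, encrypt_id_alt]
  rw [Int.natAbs_natCast, encryptLoop_eq (m + 1) m [] (by omega), List.nil_append,
    rangeMapB m _ rfl]
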